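-- pv_equiv track=rewrite | github.com/jona-sassenhagen/differ | differ.py | many_pass_markup
-- ===== SOURCE A (Python) =====
-- def longest_common_substring(S1, S2):
--   # find common substring len 1 or return None
--
--   # there are better algorithms, maybe suffix trees?
--
--   best_substring = ""
--   for best_length in range(len(S1)):
--     for index in range(len(S1)):
--       if index + best_length + 1 > len(S1):
--         break
--       if S1[index:index + best_length + 1] in S2:
--         best_substring = S1[index:index+best_length+1]
--         break
--   return best_substring
--
-- def many_pass_markup(old_string, new_string):
--   # hopper = [full old string, full new string]
--   # final = ''
--   # checkout and compare first two items in hopper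
--   # 1. if identical, write once to final
--   # 2. if completely different, no common substring, write to end of final
--   #      with markup. eg, final = '{--old--}{++new++}'
--   # 3. if some common substring, push back into front of hopper as so:
--   #      [...] -> [old.pre, new.pre, lcs, lcs, old.post, new.post, ...]
--   #   Note: duplicating the longest common substring allows us to check out
--   #         two items every time without thinking
--   # 4. return to checkout step until hopper empty
--   hopper = [old_string, new_string]
--   final_string = ""
--   while len(hopper) > 0:
--     old_string, new_string, hopper = hopper[0], hopper[1], hopper[2:]
--     if old_string == new_string:
--       final_string += old_string
--     else:
--       lcs = longest_common_substring(old_string, new_string)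
--       if lcs == None or " " not in lcs:
--       # the '" " not in lcs' chunk improves readability of markup
--       # it makes sure changes aren't detected letter by letter
--       # this should be removed once tokens are fixed
--         lcs = ""
--       if lcs == "":
--         if old_string != "":
--           final_string = final_string + "{--" + old_string + "--}"
--         if new_string != "":
--           final_string = final_string + "{++" + new_string + "++}"
--       else:
--           lcs_length = len(lcs)
--           # find index
--           old_lcs_index = old_string.find(lcs)
--           new_lcs_index = new_string.find(lcs)
--           old_pre = old_string[:old_lcs_index]
--           new_pre = new_string[:new_lcs_index]
--           old_post = old_string[old_lcs_index + lcs_length:]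
--           new_post = new_string[new_lcs_index + lcs_length:]
--           old_hopper = hopper
--           hopper = [old_pre, new_pre, lcs, lcs, old_post, new_post]
--           hopper.extend(old_hopper)
--   return final_string
-- ===== SOURCE B (Python) =====
-- def _lcs_grow(S1, S2):
--     # single pass over start positions, growing the best length by one at a time:
--     # for each start, try to extend the current best; only successful extensions cost work
--     best = 0
--     best_substring = ""
--     for index in range(len(S1)):
--         while index + best + 1 <= len(S1) and S1[index:index + best + 1] in S2:
--             best += 1
--             best_substring = S1[index:index + best]
--     return best_substring
--
-- def many_pass_markup(old_string, new_string):
--     if old_string == new_string: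
--         return old_string
--     lcs = _lcs_grow(old_string, new_string)
--     if " " not in lcs:
--         out = ""
--         if old_string != "":
--             out += "{--" + old_string + "--}"
--         if new_string != "":
--             out += "{++" + new_string + "++}"
--         return out
--     i = old_string.find(lcs)
--     j = new_string.find(lcs)
--     L = len(lcs)
--     return (many_pass_markup(old_string[:i], new_string[:j]) + lcs
--             + many_pass_markup(old_string[i + L:], new_string[j + L:]))
-- ===== Notes on version B (the rewrite author's own statement) =====
-- stated objective: faster
-- what changed: The longest-common-substring search is replaced by the classic grow-the-best single pass (for each start position, try to extend the current best length by one, so only O(n) failing substring checks happen in total instead of O(n^2)), and the hopper work-list loop is replaced by direct recursion on the pre/lcs/post split.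
import Mathlib
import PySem

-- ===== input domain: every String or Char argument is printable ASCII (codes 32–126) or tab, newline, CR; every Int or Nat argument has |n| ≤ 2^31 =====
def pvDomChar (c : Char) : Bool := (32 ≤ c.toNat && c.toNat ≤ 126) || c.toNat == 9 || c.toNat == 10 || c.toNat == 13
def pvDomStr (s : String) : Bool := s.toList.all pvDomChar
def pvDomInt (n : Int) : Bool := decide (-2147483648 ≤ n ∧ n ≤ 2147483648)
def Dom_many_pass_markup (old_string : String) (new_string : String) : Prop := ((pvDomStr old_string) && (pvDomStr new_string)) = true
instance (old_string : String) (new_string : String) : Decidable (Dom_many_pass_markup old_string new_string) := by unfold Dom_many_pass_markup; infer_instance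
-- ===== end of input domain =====

-- B replaces A's try-every-length-ascending LCS scan by the classic grow-the-best single pass over
-- start positions, and A's hopper work-list loop by direct recursion on the pre/lcs/post split
-- (objective: faster — fewer substring membership checks per LCS call).
-- All loops/recursions are ported with a fuel counter as a totality guard only; each fuel value is
-- large enough that the guard is never hit (see the _spec lemmas below).

-- ===== PORT A =====

-- inner 'for index in range(len(S1)): if index+best_length+1 > len(S1): break; if S1[...] in S2: best_substring = ...; break'
def lcsA_inner (S1 S2 : List Char) (L : Nat) (best : List Char) (index : Nat) (fuel : Nat) : List Char :=
  match fuel with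
  | 0 => best
  | fuel + 1 =>
    if index < S1.length then
      if S1.length < index + L + 1 then best
      else
        if PySem.Chars.isIn (PySem.List.slice S1 (some (index : Int)) (some ((index : Int) + (L : Int) + 1))) S2 then
          PySem.List.slice S1 (some (index : Int)) (some ((index : Int) + (L : Int) + 1))
        else lcsA_inner S1 S2 L best (index + 1) fuel
    else best

-- outer 'for best_length in range(len(S1))'
def lcsA_outer (S1 S2 : List Char) (best : List Char) (L : Nat) (fuel : Nat) : List Char :=
  match fuel with
  | 0 => best
  | fuel + 1 =>
    if L < S1.length then
      lcsA_outer S1 S2 (lcsA_inner S1 S2 L best 0 (S1.length + 1)) (L + 1) fuel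
    else best

def lcsA (S1 S2 : List Char) : List Char := lcsA_outer S1 S2 [] 0 (S1.length + 1)

-- the 'while len(hopper) > 0' loop
def hopperLoop (fuel : Nat) (hopper : List (List Char)) (final : List Char) : List Char :=
  match fuel, hopper with
  | _, [] => final
  | _, [_] => final          -- unreachable: the hopper always holds an even number of items
  | 0, _ :: _ :: _ => final  -- fuel exhausted: unreachable, the measure mu below bounds the iterations
  | fuel + 1, o :: n :: rest =>
    if o = n then hopperLoop fuel rest (final ++ o)
    else
      let lcs0 := lcsA o n
      -- 'if lcs == None or " " not in lcs: lcs = ""'  (the Lean lcsA never returns a None)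
      let lcs := if PySem.Chars.isIn [' '] lcs0 = false then [] else lcs0
      if lcs = [] then
        let f1 := if o ≠ [] then final ++ ['{', '-', '-'] ++ o ++ ['-', '-', '}'] else final
        let f2 := if n ≠ [] then f1 ++ ['{', '+', '+'] ++ n ++ ['+', '+', '}'] else f1
        hopperLoop fuel rest f2
      else
        let L := (lcs.length : Int)
        let oi := PySem.Chars.find o lcs
        let ni := PySem.Chars.find n lcs
        hopperLoop fuel
          (PySem.List.slice o none (some oi) :: PySem.List.slice n none (some ni) ::
           lcs :: lcs ::
           PySem.List.slice o (some (oi + L)) none :: PySem.List.slice n (some (ni + L)) none :: rest)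
          final

def many_pass_markup (old_string : String) (new_string : String) : String :=
  String.ofList (hopperLoop (2 * (old_string.toList.length + new_string.toList.length) + 4)
    [old_string.toList, new_string.toList] [])

-- ===== PORT B =====

-- inner 'while index + best + 1 <= len(S1) and S1[index:index+best+1] in S2: best += 1; best_substring = ...'
def lcsB_while (S1 S2 : List Char) (index : Nat) (best : Nat) (bs : List Char) (fuel : Nat) : Nat × List Char :=
  match fuel with
  | 0 => (best, bs)
  | fuel + 1 =>
    if index + best + 1 ≤ S1.length ∧
        PySem.Chars.isIn (PySem.List.slice S1 (some (index : Int)) (some ((index : Int) + (best : Int) + 1))) S2 = true then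
      lcsB_while S1 S2 index (best + 1)
        (PySem.List.slice S1 (some (index : Int)) (some ((index : Int) + (best : Int) + 1))) fuel
    else (best, bs)

-- outer 'for index in range(len(S1))'
def lcsB_for (S1 S2 : List Char) (best : Nat) (bs : List Char) (index : Nat) (fuel : Nat) : List Char :=
  match fuel with
  | 0 => bs
  | fuel + 1 =>
    if index < S1.length then
      lcsB_for S1 S2 (lcsB_while S1 S2 index best bs (S1.length + 1)).1
        (lcsB_while S1 S2 index best bs (S1.length + 1)).2 (index + 1) fuel
    else bs

def lcsB (S1 S2 : List Char) : List Char := lcsB_for S1 S2 0 [] 0 (S1.length + 1)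

-- B's many_pass_markup: direct recursion on the pre/lcs/post split
def markupB (fuel : Nat) (o n : List Char) : List Char :=
  match fuel with
  | 0 => []
  | fuel + 1 =>
    if o = n then o
    else
      if PySem.Chars.isIn [' '] (lcsB o n) = false then
        (if o ≠ [] then ['{', '-', '-'] ++ o ++ ['-', '-', '}'] else []) ++
        (if n ≠ [] then ['{', '+', '+'] ++ n ++ ['+', '+', '}'] else [])
      else
        markupB fuel (PySem.List.slice o none (some (PySem.Chars.find o (lcsB o n))))
                (PySem.List.slice n none (some (PySem.Chars.find n (lcsB o n)))) ++
        lcsB o n ++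
        markupB fuel (PySem.List.slice o (some (PySem.Chars.find o (lcsB o n) + ((lcsB o n).length : Int))) none)
                (PySem.List.slice n (some (PySem.Chars.find n (lcsB o n) + ((lcsB o n).length : Int))) none)

def many_pass_markup_alt (old_string : String) (new_string : String) : String :=
  String.ofList (markupB (old_string.toList.length + new_string.toList.length + 1)
    old_string.toList new_string.toList)

-- ===== PRECONDITION & SPEC =====
def Spec_many_pass_markup (old_string : String) (new_string : String) (out : String) : Prop := out = many_pass_markup_alt old_string new_string
instance (old_string : String) (new_string : String) (out : String) : Decidable (Spec_many_pass_markup old_string new_string out) := by unfold Spec_many_pass_markup; infer_instance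

-- ===== CLAIM (what is proved, stated in full; the proofs are below) =====
def Claim_equal_many_pass_markup : Prop := ∀ (old_string : String) (new_string : String), Dom_many_pass_markup old_string new_string → Spec_many_pass_markup old_string new_string (many_pass_markup old_string new_string)

-- ===== LEMMAS AND PROOFS =====

theorem sliceWin (S1 : List Char) (i b : Nat) :
    PySem.List.slice S1 (some (i : Int)) (some ((i : Int) + (b : Int) + 1)) = (S1.drop i).take (b + 1) := by
  have : ((i : Int) + (b : Int) + 1) = ((i : Int) + ((b + 1 : Nat) : Int)) := by push_cast; ring
  rw [this, PySem.List.slice_natCast_add]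

theorem winInfix (S1 : List Char) (i b : Nat) : (S1.drop i).take b <:+: S1 :=
  ((List.take_prefix _ _).isInfix).trans (List.drop_suffix _ _).isInfix

-- ---- substring / containment facts about lcsB needed for the split step ----

theorem lcsB_while_inv (S1 S2 : List Char) (i : Nat) : ∀ (fuel b : Nat) (bs : List Char),
    bs <:+: S1 → (bs ≠ [] → PySem.Chars.isIn bs S2 = true) →
    (lcsB_while S1 S2 i b bs fuel).2 <:+: S1 ∧
      ((lcsB_while S1 S2 i b bs fuel).2 ≠ [] → PySem.Chars.isIn (lcsB_while S1 S2 i b bs fuel).2 S2 = true) := by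
  intro fuel
  induction fuel with
  | zero => intro b bs h1 h2; exact ⟨h1, h2⟩
  | succ fuel ih =>
    intro b bs h1 h2
    rw [lcsB_while]
    by_cases h : i + b + 1 ≤ S1.length ∧
        PySem.Chars.isIn (PySem.List.slice S1 (some (i : Int)) (some ((i : Int) + (b : Int) + 1))) S2 = true
    · rw [if_pos h]
      exact ih (b + 1) _ (by rw [sliceWin]; exact winInfix S1 i (b + 1)) (fun _ => h.2)
    · rw [if_neg h]
      exact ⟨h1, h2⟩

theorem lcsB_for_inv (S1 S2 : List Char) : ∀ (fuel b : Nat) (bs : List Char) (index : Nat),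
    bs <:+: S1 → (bs ≠ [] → PySem.Chars.isIn bs S2 = true) →
    lcsB_for S1 S2 b bs index fuel <:+: S1 ∧
      (lcsB_for S1 S2 b bs index fuel ≠ [] → PySem.Chars.isIn (lcsB_for S1 S2 b bs index fuel) S2 = true) := by
  intro fuel
  induction fuel with
  | zero => intro b bs index h1 h2; exact ⟨h1, h2⟩
  | succ fuel ih =>
    intro b bs index h1 h2
    rw [lcsB_for]
    by_cases h : index < S1.length
    · rw [if_pos h]
      exact ih _ _ _ (lcsB_while_inv S1 S2 index _ b bs h1 h2).1
        (lcsB_while_inv S1 S2 index _ b bs h1 h2).2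
    · rw [if_neg h]
      exact ⟨h1, h2⟩

theorem lcsB_facts (S1 S2 : List Char) :
    lcsB S1 S2 <:+: S1 ∧ (lcsB S1 S2 ≠ [] → PySem.Chars.isIn (lcsB S1 S2) S2 = true) := by
  unfold lcsB
  exact lcsB_for_inv S1 S2 _ 0 [] 0 List.nil_infix (by simp)

theorem lcs_space_facts (o n : List Char) (h : PySem.Chars.isIn [' '] (lcsB o n) = true) :
    1 ≤ (lcsB o n).length ∧
    0 ≤ PySem.Chars.find o (lcsB o n) ∧ 0 ≤ PySem.Chars.find n (lcsB o n) ∧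
    (PySem.Chars.find o (lcsB o n)).toNat + (lcsB o n).length ≤ o.length ∧
    (PySem.Chars.find n (lcsB o n)).toNat + (lcsB o n).length ≤ n.length := by
  have hlen : 1 ≤ (lcsB o n).length := by
    have h1 := ((PySem.Chars.isIn_iff_infix _ _).mp h).length_le
    simpa using h1
  have hne : lcsB o n ≠ [] := by intro he; rw [he] at hlen; simp at hlen
  have hinfo : lcsB o n <:+: o := (lcsB_facts o n).1
  have hinfn : lcsB o n <:+: n := (PySem.Chars.isIn_iff_infix _ _).mp ((lcsB_facts o n).2 hne)
  have ho : 0 ≤ PySem.Chars.find o (lcsB o n) := (PySem.Chars.find_nonneg_iff _ _).mpr hinfo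
  have hn : 0 ≤ PySem.Chars.find n (lcsB o n) := (PySem.Chars.find_nonneg_iff _ _).mpr hinfn
  have hpo := (PySem.Chars.find_spec ho).1.length_le
  have hpn := (PySem.Chars.find_spec hn).1.length_le
  simp [List.length_drop] at hpo hpn
  exact ⟨hlen, ho, hn, by omega, by omega⟩

theorem markup_dec_pre (o n : List Char) (h : PySem.Chars.isIn [' '] (lcsB o n) = true) :
    (PySem.List.slice o none (some (PySem.Chars.find o (lcsB o n)))).length +
      (PySem.List.slice n none (some (PySem.Chars.find n (lcsB o n)))).length < o.length + n.length := by
  obtain ⟨hlen, ho, hn, hbo, hbn⟩ := lcs_space_facts o n h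
  rw [PySem.List.slice_to _ ho, PySem.List.slice_to _ hn]
  simp [List.length_take]
  omega

theorem markup_dec_post (o n : List Char) (h : PySem.Chars.isIn [' '] (lcsB o n) = true) :
    (PySem.List.slice o (some (PySem.Chars.find o (lcsB o n) + ((lcsB o n).length : Int))) none).length +
      (PySem.List.slice n (some (PySem.Chars.find n (lcsB o n) + ((lcsB o n).length : Int))) none).length
      < o.length + n.length := by
  obtain ⟨hlen, ho, hn, hbo, hbn⟩ := lcs_space_facts o n h
  rw [PySem.List.slice_from _ (by omega), PySem.List.slice_from _ (by omega)]
  simp [List.length_drop]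
  omega

-- ---- a common characterization of both LCS searches ----

-- the window of S1 of length L starting at i
def win (S1 : List Char) (i L : Nat) : List Char := (S1.drop i).take L

-- 'the window of length L at i fits and occurs in S2'
def goodB (S1 S2 : List Char) (i L : Nat) : Bool :=
  decide (i + L ≤ S1.length) && PySem.Chars.isIn (win S1 i L) S2

-- largest good window length at start i
def eMax (S1 S2 : List Char) (i : Nat) : Nat :=
  Nat.findGreatest (fun L => goodB S1 S2 i L = true) S1.length

-- some good window of length L exists
def feasB (S1 S2 : List Char) (L : Nat) : Bool :=
  (List.range (S1.length + 1)).any (fun i => goodB S1 S2 i L)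

-- the overall maximal good length
def KK (S1 S2 : List Char) : Nat :=
  Nat.findGreatest (fun L => feasB S1 S2 L = true) S1.length

-- first start index ≥ idx whose window of length M is good (S1.length if none)
def firstGood (S1 S2 : List Char) (M idx fuel : Nat) : Nat :=
  match fuel with
  | 0 => S1.length
  | fuel + 1 =>
    if idx < S1.length then
      (if goodB S1 S2 idx M then idx else firstGood S1 S2 M (idx + 1) fuel)
    else S1.length

-- the canonical result both searches compute
def ARES (S1 S2 : List Char) : List Char :=
  if 0 < KK S1 S2 then win S1 (firstGood S1 S2 (KK S1 S2) 0 (S1.length + 1)) (KK S1 S2) else []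

theorem good_bound (S1 S2 : List Char) (i M : Nat) (h : goodB S1 S2 i M = true) :
    i + M ≤ S1.length := by
  simp [goodB] at h; exact h.1

theorem good_succ (S1 S2 : List Char) (i L : Nat) (h : goodB S1 S2 i (L + 1) = true) :
    goodB S1 S2 i L = true := by
  simp [goodB, win] at h ⊢
  refine ⟨by omega, ?_⟩
  have hpre : (S1.drop i).take L <+: (S1.drop i).take (L + 1) := by
    rw [show (S1.drop i).take L = ((S1.drop i).take (L + 1)).take L by
      rw [List.take_take]; congr 1; omega]
    exact List.take_prefix _ _
  exact (PySem.Chars.isIn_iff_infix _ _).mpr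
    (hpre.isInfix.trans ((PySem.Chars.isIn_iff_infix _ _).mp h.2))

theorem good_anti (S1 S2 : List Char) (i : Nat) : ∀ (L M : Nat), M ≤ L →
    goodB S1 S2 i L = true → goodB S1 S2 i M = true := by
  intro L
  induction L with
  | zero => intro M hM h; simpa [Nat.le_zero.mp hM] using h
  | succ L ih =>
    intro M hM h
    rcases Nat.eq_or_lt_of_le hM with rfl | hlt
    · exact h
    · exact ih M (by omega) (good_succ S1 S2 i L h)

theorem good_iff_le_E (S1 S2 : List Char) (i L : Nat) (hL : 1 ≤ L) :
    goodB S1 S2 i L = true ↔ L ≤ eMax S1 S2 i := by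
  constructor
  · intro h
    exact Nat.le_findGreatest (by have := good_bound S1 S2 i L h; omega) h
  · intro h
    have h0 : 0 < eMax S1 S2 i := by omega
    have hspec := (Nat.findGreatest_eq_iff.mp (rfl : Nat.findGreatest (fun L => goodB S1 S2 i L = true) S1.length = eMax S1 S2 i)).2.1
    exact good_anti S1 S2 i _ L h (hspec (by show eMax S1 S2 i ≠ 0; omega))

theorem eMax_le (S1 S2 : List Char) (i : Nat) : eMax S1 S2 i ≤ S1.length :=
  Nat.findGreatest_le _

theorem feasB_iff (S1 S2 : List Char) (L : Nat) :
    feasB S1 S2 L = true ↔ ∃ i, goodB S1 S2 i L = true := by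
  simp only [feasB, List.any_eq_true, List.mem_range]
  constructor
  · rintro ⟨i, _, h⟩; exact ⟨i, h⟩
  · rintro ⟨i, h⟩
    exact ⟨i, by have := good_bound S1 S2 i L h; omega, h⟩

theorem feas_iff_le_K (S1 S2 : List Char) (M : Nat) (hM : 1 ≤ M) :
    feasB S1 S2 M = true ↔ M ≤ KK S1 S2 := by
  constructor
  · intro h
    obtain ⟨i, hi⟩ := (feasB_iff S1 S2 M).mp h
    exact Nat.le_findGreatest (by have := good_bound S1 S2 i M hi; omega) h
  · intro h
    have h0 : 0 < KK S1 S2 := by omega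
    have hK := (Nat.findGreatest_eq_iff.mp (rfl : Nat.findGreatest (fun L => feasB S1 S2 L = true) S1.length = KK S1 S2)).2.1
    obtain ⟨i, hi⟩ := (feasB_iff S1 S2 _).mp (hK (by show KK S1 S2 ≠ 0; omega))
    exact (feasB_iff S1 S2 M).mpr ⟨i, good_anti S1 S2 i _ M h hi⟩

theorem KK_le (S1 S2 : List Char) : KK S1 S2 ≤ S1.length := Nat.findGreatest_le _

theorem fg_min (S1 S2 : List Char) (M : Nat) : ∀ (fuel idx i : Nat), S1.length < idx + fuel →
    idx ≤ i → i < firstGood S1 S2 M idx fuel → goodB S1 S2 i M ≠ true := by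
  intro fuel
  induction fuel with
  | zero => intro idx i hfu h1 h2; simp only [firstGood] at h2; omega
  | succ fuel ih =>
    intro idx i hfu h1 h2
    rw [firstGood] at h2
    by_cases hlt : idx < S1.length
    · rw [if_pos hlt] at h2
      by_cases hg : goodB S1 S2 idx M
      · rw [if_pos hg] at h2; omega
      · rw [if_neg hg] at h2
        rcases Nat.eq_or_lt_of_le h1 with rfl | hlt2
        · simpa using hg
        · exact ih (idx + 1) i (by omega) (by omega) h2
    · rw [if_neg hlt] at h2
      intro hgood
      have := good_bound S1 S2 i M hgood
      omega

theorem fg_found (S1 S2 : List Char) (M : Nat) (hM : 1 ≤ M) : ∀ (fuel idx i0 : Nat),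
    S1.length < idx + fuel → idx ≤ i0 → goodB S1 S2 i0 M = true →
    goodB S1 S2 (firstGood S1 S2 M idx fuel) M = true ∧ firstGood S1 S2 M idx fuel ≤ i0 := by
  intro fuel
  induction fuel with
  | zero =>
    intro idx i0 hfu h1 h2
    have := good_bound S1 S2 i0 M h2
    omega
  | succ fuel ih =>
    intro idx i0 hfu h1 h2
    rw [firstGood]
    by_cases hlt : idx < S1.length
    · rw [if_pos hlt]
      by_cases hg : goodB S1 S2 idx M
      · rw [if_pos hg]; exact ⟨hg, h1⟩
      · rw [if_neg hg]
        rcases Nat.eq_or_lt_of_le h1 with rfl | hlt2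
        · simp at hg; rw [hg] at h2; exact absurd h2 (by simp)
        · exact ih (idx + 1) i0 (by omega) (by omega) h2
    · have := good_bound S1 S2 i0 M h2
      omega

theorem fg_eq (S1 S2 : List Char) (M i0 : Nat) (hM : 1 ≤ M)
    (hg : goodB S1 S2 i0 M = true) (hmin : ∀ i, i < i0 → goodB S1 S2 i M ≠ true) :
    firstGood S1 S2 M 0 (S1.length + 1) = i0 := by
  obtain ⟨h1, h2⟩ := fg_found S1 S2 M hM (S1.length + 1) 0 i0 (by omega) (Nat.zero_le _) hg
  rcases Nat.lt_or_ge (firstGood S1 S2 M 0 (S1.length + 1)) i0 with hlt | hge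
  · exact absurd h1 (hmin _ hlt)
  · omega

-- ---- A's search computes ARES ----

theorem inner_none (S1 S2 : List Char) (L : Nat) (best : List Char) : ∀ (fuel idx : Nat),
    (∀ i, idx ≤ i → goodB S1 S2 i (L + 1) ≠ true) →
    lcsA_inner S1 S2 L best idx fuel = best := by
  intro fuel
  induction fuel with
  | zero => intro idx _; rfl
  | succ fuel ih =>
    intro idx hno
    rw [lcsA_inner]
    by_cases h : idx < S1.length
    · rw [if_pos h]
      by_cases hbrk : S1.length < idx + L + 1
      · rw [if_pos hbrk]
      · rw [if_neg hbrk]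
        have hin : PySem.Chars.isIn (PySem.List.slice S1 (some (idx : Int)) (some ((idx : Int) + (L : Int) + 1))) S2 ≠ true := by
          rw [sliceWin]
          intro hc
          apply hno idx le_rfl
          simp [goodB, win, hc]
          omega
        rw [if_neg hin]
        exact ih (idx + 1) (fun i hi => hno i (by omega))
    · rw [if_neg h]

theorem inner_found (S1 S2 : List Char) (L : Nat) (best : List Char) (i0 : Nat) : ∀ (fuel idx : Nat),
    S1.length < idx + fuel → idx ≤ i0 → goodB S1 S2 i0 (L + 1) = true →
    (∀ i, idx ≤ i → i < i0 → goodB S1 S2 i (L + 1) ≠ true) →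
    lcsA_inner S1 S2 L best idx fuel = win S1 i0 (L + 1) := by
  intro fuel
  induction fuel with
  | zero =>
    intro idx hfu hi hg hmin
    have := good_bound S1 S2 i0 (L + 1) hg
    omega
  | succ fuel ih =>
    intro idx hfu hi hg hmin
    have hb := good_bound S1 S2 i0 (L + 1) hg
    rw [lcsA_inner]
    rw [if_pos (by omega : idx < S1.length), if_neg (by omega : ¬ S1.length < idx + L + 1)]
    by_cases hin : PySem.Chars.isIn (PySem.List.slice S1 (some (idx : Int)) (some ((idx : Int) + (L : Int) + 1))) S2 = true
    · rw [if_pos hin]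
      have hgood : goodB S1 S2 idx (L + 1) = true := by
        rw [sliceWin] at hin; simp [goodB, win, hin]; omega
      have heq : idx = i0 := by
        by_contra hne
        exact hmin idx le_rfl (by omega) hgood
      simp [sliceWin, heq, win]
    · rw [if_neg hin]
      have hnotgood : goodB S1 S2 idx (L + 1) ≠ true := by
        rw [sliceWin] at hin
        intro hc
        simp [goodB, win] at hc
        exact hin hc.2
      have hne : idx ≠ i0 := fun he => hnotgood (he ▸ hg)
      exact ih (idx + 1) (by omega) (by omega) hg (fun i hi1 hi2 => hmin i (by omega) hi2)

theorem outer_eq (S1 S2 : List Char) : ∀ (fuel L : Nat) (best : List Char), S1.length < L + fuel →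
    lcsA_outer S1 S2 best L fuel =
      if L < KK S1 S2 then win S1 (firstGood S1 S2 (KK S1 S2) 0 (S1.length + 1)) (KK S1 S2) else best := by
  intro fuel
  induction fuel with
  | zero =>
    intro L best hfu
    have := KK_le S1 S2
    rw [lcsA_outer, if_neg (by omega)]
  | succ fuel ih =>
    intro L best hfu
    rw [lcsA_outer]
    by_cases h : L < S1.length
    · rw [if_pos h, ih (L + 1) _ (by omega)]
      by_cases hK1 : L + 1 < KK S1 S2
      · rw [if_pos hK1, if_pos (by omega)]
      · by_cases hK2 : L + 1 = KK S1 S2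
        · rw [if_neg hK1, if_pos (by omega), ← hK2]
          obtain ⟨j, hj⟩ := (feasB_iff S1 S2 (L + 1)).mp
            ((feas_iff_le_K S1 S2 (L + 1) (by omega)).mpr (by omega))
          have hfg := fg_found S1 S2 (L + 1) (by omega) (S1.length + 1) 0 j (by omega) (Nat.zero_le _) hj
          exact inner_found S1 S2 L best _ _ 0 (by omega) (Nat.zero_le _) hfg.1
            (fun i h1 h2 => fg_min S1 S2 (L + 1) (S1.length + 1) 0 i (by omega) h1 h2)
        · have hnf : ∀ i, goodB S1 S2 i (L + 1) ≠ true := by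
            intro i hg
            have hfe : feasB S1 S2 (L + 1) = true := (feasB_iff S1 S2 _).mpr ⟨i, hg⟩
            have := (feas_iff_le_K S1 S2 (L + 1) (by omega)).mp hfe
            omega
          rw [if_neg hK1, if_neg (by omega)]
          exact inner_none S1 S2 L best _ 0 (fun i _ => hnf i)
    · have := KK_le S1 S2
      rw [if_neg h, if_neg (by omega)]

theorem lcsA_spec (S1 S2 : List Char) : lcsA S1 S2 = ARES S1 S2 := by
  unfold lcsA ARES
  rw [outer_eq S1 S2 (S1.length + 1) 0 [] (by omega)]

-- ---- B's search computes ARES ----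

theorem whileB_eq (S1 S2 : List Char) (i : Nat) : ∀ (fuel b : Nat) (bs : List Char), S1.length < b + fuel →
    lcsB_while S1 S2 i b bs fuel =
      if b < eMax S1 S2 i then (eMax S1 S2 i, win S1 i (eMax S1 S2 i)) else (b, bs) := by
  intro fuel
  induction fuel with
  | zero =>
    intro b bs hfu
    have := eMax_le S1 S2 i
    rw [lcsB_while, if_neg (by omega)]
  | succ fuel ih =>
    intro b bs hfu
    rw [lcsB_while]
    by_cases h : i + b + 1 ≤ S1.length ∧
        PySem.Chars.isIn (PySem.List.slice S1 (some (i : Int)) (some ((i : Int) + (b : Int) + 1))) S2 = true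
    · rw [if_pos h]
      have hg : goodB S1 S2 i (b + 1) = true := by
        obtain ⟨h1, h2⟩ := h
        rw [sliceWin] at h2
        simp [goodB, win, h2]
        omega
      have hle : b + 1 ≤ eMax S1 S2 i := (good_iff_le_E S1 S2 i (b + 1) (by omega)).mp hg
      rw [ih (b + 1) _ (by omega)]
      by_cases h2 : b + 1 < eMax S1 S2 i
      · rw [if_pos h2, if_pos (by omega)]
      · have heq : b + 1 = eMax S1 S2 i := by omega
        rw [if_neg h2, if_pos (by omega), ← heq, sliceWin]
        rfl
    · rw [if_neg h]
      have hg : goodB S1 S2 i (b + 1) ≠ true := by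
        intro hgood
        apply h
        simp [goodB, win] at hgood
        exact ⟨by omega, by rw [sliceWin]; simpa [win] using hgood.2⟩
      have hnle : ¬ (b + 1 ≤ eMax S1 S2 i) :=
        fun hle => hg ((good_iff_le_E S1 S2 i (b + 1) (by omega)).mpr hle)
      rw [if_neg (by omega)]

-- the loop state invariant implies the final value once the scan is past the end
theorem forB_fin (S1 S2 : List Char) (b : Nat) (bs : List Char) (idx : Nat)
    (hend : S1.length ≤ idx)
    (I1 : ∀ i, i < idx → eMax S1 S2 i ≤ b)
    (I2 : b = 0 → bs = [])
    (I3 : 0 < b → goodB S1 S2 (firstGood S1 S2 b 0 (S1.length + 1)) b = true ∧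
      bs = win S1 (firstGood S1 S2 b 0 (S1.length + 1)) b ∧ firstGood S1 S2 b 0 (S1.length + 1) < idx) :
    bs = ARES S1 S2 := by
  rcases Nat.eq_zero_or_pos b with hb | hb
  · have hK0 : KK S1 S2 = 0 := by
      by_contra hK
      have hKpos : 0 < KK S1 S2 := by omega
      obtain ⟨j, hj⟩ := (feasB_iff S1 S2 _).mp
        ((feas_iff_le_K S1 S2 _ hKpos).mpr le_rfl)
      have hjb := good_bound S1 S2 j _ hj
      have hjlt : j < idx := by omega
      have := (good_iff_le_E S1 S2 j _ hKpos).mp hj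
      have := I1 j hjlt
      omega
    rw [I2 hb]
    unfold ARES
    rw [if_neg (by omega)]
  · obtain ⟨hgood, hbs, _⟩ := I3 hb
    have hbK : b ≤ KK S1 S2 :=
      (feas_iff_le_K S1 S2 b hb).mp ((feasB_iff S1 S2 b).mpr ⟨_, hgood⟩)
    have hKb : KK S1 S2 ≤ b := by
      have hKpos : 0 < KK S1 S2 := by omega
      obtain ⟨j, hj⟩ := (feasB_iff S1 S2 _).mp
        ((feas_iff_le_K S1 S2 _ hKpos).mpr le_rfl)
      have hjb := good_bound S1 S2 j _ hj
      have hjlt : j < idx := by omega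
      have := (good_iff_le_E S1 S2 j _ hKpos).mp hj
      have := I1 j hjlt
      omega
    have hKeq : KK S1 S2 = b := by omega
    rw [hbs]
    unfold ARES
    rw [if_pos (by omega), hKeq]

theorem forB_main (S1 S2 : List Char) : ∀ (fuel : Nat) (b : Nat) (bs : List Char) (idx : Nat),
    S1.length < idx + fuel →
    (∀ i, i < idx → eMax S1 S2 i ≤ b) →
    (b = 0 → bs = []) →
    (0 < b → goodB S1 S2 (firstGood S1 S2 b 0 (S1.length + 1)) b = true ∧
      bs = win S1 (firstGood S1 S2 b 0 (S1.length + 1)) b ∧ firstGood S1 S2 b 0 (S1.length + 1) < idx) →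
    lcsB_for S1 S2 b bs idx fuel = ARES S1 S2 := by
  intro fuel
  induction fuel with
  | zero =>
    intro b bs idx hfu I1 I2 I3
    rw [lcsB_for]
    exact forB_fin S1 S2 b bs idx (by omega) I1 I2 I3
  | succ fuel ih =>
    intro b bs idx hfu I1 I2 I3
    rw [lcsB_for]
    by_cases h : idx < S1.length
    · rw [if_pos h]
      have hw := whileB_eq S1 S2 idx (S1.length + 1) b bs (by omega)
      by_cases hlt : b < eMax S1 S2 idx
      · rw [if_pos hlt] at hw
        simp only [hw]
        have hE1 : 1 ≤ eMax S1 S2 idx := by omega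
        have hgidx : goodB S1 S2 idx (eMax S1 S2 idx) = true :=
          (good_iff_le_E S1 S2 idx _ hE1).mpr le_rfl
        have hfg : firstGood S1 S2 (eMax S1 S2 idx) 0 (S1.length + 1) = idx := by
          apply fg_eq S1 S2 _ idx hE1 hgidx
          intro i hi hgi
          have h1 := (good_iff_le_E S1 S2 i _ hE1).mp hgi
          have h2 := I1 i hi
          omega
        refine ih _ _ _ (by omega) ?_ ?_ ?_
        · intro i hi
          rcases Nat.lt_succ_iff_lt_or_eq.mp hi with h2 | h2
          · exact le_trans (I1 i h2) (by omega)
          · exact h2 ▸ le_rfl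
        · intro h0; omega
        · intro _
          rw [hfg]
          exact ⟨hgidx, rfl, by omega⟩
      · rw [if_neg hlt] at hw
        simp only [hw]
        refine ih _ _ _ (by omega) ?_ I2 ?_
        · intro i hi
          rcases Nat.lt_succ_iff_lt_or_eq.mp hi with h2 | h2
          · exact I1 i h2
          · exact h2 ▸ (by omega)
        · intro hb
          exact ⟨(I3 hb).1, (I3 hb).2.1, by have := (I3 hb).2.2; omega⟩
    · rw [if_neg h]
      exact forB_fin S1 S2 b bs idx (by omega) I1 I2 I3

theorem lcsB_spec (S1 S2 : List Char) : lcsB S1 S2 = ARES S1 S2 := by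
  unfold lcsB
  exact forB_main S1 S2 (S1.length + 1) 0 [] 0 (by omega) (by omega) (fun _ => rfl) (by omega)

theorem lcsA_eq_lcsB (S1 S2 : List Char) : lcsA S1 S2 = lcsB S1 S2 :=
  (lcsA_spec S1 S2).trans (lcsB_spec S1 S2).symm

-- ---- the hopper loop versus B's recursion ----

-- markupB ignores the exact fuel once it exceeds the total length (each split strictly shrinks it)
theorem markupB_fuel : ∀ (f g : Nat) (o n : List Char), o.length + n.length < f → o.length + n.length < g →
    markupB f o n = markupB g o n := by
  intro f
  induction f with
  | zero => intro g o n hf; omega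
  | succ f ihf =>
    intro g o n hf hg
    match g, hg with
    | g + 1, hg =>
      rw [markupB, markupB]
      by_cases he : o = n
      · rw [if_pos he, if_pos he]
      · rw [if_neg he, if_neg he]
        by_cases hsp : PySem.Chars.isIn [' '] (lcsB o n) = false
        · rw [if_pos hsp, if_pos hsp]
        · rw [if_neg hsp, if_neg hsp]
          have hsp2 : PySem.Chars.isIn [' '] (lcsB o n) = true := by
            revert hsp; cases PySem.Chars.isIn [' '] (lcsB o n) <;> simp
          have hd1 := markup_dec_pre o n hsp2
          have hd2 := markup_dec_post o n hsp2
          rw [ihf g _ _ (by omega) (by omega), ihf g _ _ (by omega) (by omega)]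

theorem markupB_self (f : Nat) (o : List Char) (hf : 0 < f) : markupB f o o = o := by
  match f, hf with
  | f + 1, _ => rw [markupB, if_pos rfl]

theorem markupB_noSpace (f : Nat) (o n : List Char) (hf : o.length + n.length < f) (hne : o ≠ n)
    (hsp : PySem.Chars.isIn [' '] (lcsB o n) = false) :
    markupB f o n =
      (if o ≠ [] then ['{', '-', '-'] ++ o ++ ['-', '-', '}'] else []) ++
      (if n ≠ [] then ['{', '+', '+'] ++ n ++ ['+', '+', '}'] else []) := by
  match f, hf with
  | f + 1, _ => rw [markupB, if_neg hne, if_pos hsp]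

theorem markupB_space (o n : List Char) (hne : o ≠ n)
    (hsp : PySem.Chars.isIn [' '] (lcsB o n) = true) :
    markupB (o.length + n.length + 1) o n =
      markupB ((PySem.List.slice o none (some (PySem.Chars.find o (lcsB o n)))).length +
               (PySem.List.slice n none (some (PySem.Chars.find n (lcsB o n)))).length + 1)
              (PySem.List.slice o none (some (PySem.Chars.find o (lcsB o n))))
              (PySem.List.slice n none (some (PySem.Chars.find n (lcsB o n)))) ++
      lcsB o n ++
      markupB ((PySem.List.slice o (some (PySem.Chars.find o (lcsB o n) + ((lcsB o n).length : Int))) none).length +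
               (PySem.List.slice n (some (PySem.Chars.find n (lcsB o n) + ((lcsB o n).length : Int))) none).length + 1)
              (PySem.List.slice o (some (PySem.Chars.find o (lcsB o n) + ((lcsB o n).length : Int))) none)
              (PySem.List.slice n (some (PySem.Chars.find n (lcsB o n) + ((lcsB o n).length : Int))) none) := by
  have hd1 := markup_dec_pre o n hsp
  have hd2 := markup_dec_post o n hsp
  rw [markupB, if_neg hne, if_neg (by simp [hsp])]
  congr 1
  · congr 1
    exact markupB_fuel _ _ _ _ (by omega) (by omega)
  · exact markupB_fuel _ _ _ _ (by omega) (by omega)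

-- the measure bounding the hopper loop's iteration count
def mu : List (List Char) → Nat
  | [] => 0
  | [_] => 0
  | x :: y :: r => (if x = y then 1 else 2 + 2 * (x.length + y.length)) + mu r

-- denotation of a hopper: concatenated markup of its consecutive pairs
def pairsConcat : List (List Char) → List Char
  | [] => []
  | [_] => []
  | x :: y :: r => markupB (x.length + y.length + 1) x y ++ pairsConcat r

theorem mu_dec (o n : List Char) (rest : List (List Char)) (hne : o ≠ n)
    (hsp : PySem.Chars.isIn [' '] (lcsB o n) = true) :
    mu (PySem.List.slice o none (some (PySem.Chars.find o (lcsB o n))) ::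
        PySem.List.slice n none (some (PySem.Chars.find n (lcsB o n))) ::
        lcsB o n :: lcsB o n ::
        PySem.List.slice o (some (PySem.Chars.find o (lcsB o n) + ((lcsB o n).length : Int))) none ::
        PySem.List.slice n (some (PySem.Chars.find n (lcsB o n) + ((lcsB o n).length : Int))) none :: rest) <
      mu (o :: n :: rest) := by
  obtain ⟨hlen, ho, hn, hbo, hbn⟩ := lcs_space_facts o n hsp
  simp only [mu]
  rw [PySem.List.slice_to _ ho, PySem.List.slice_to _ hn,
      PySem.List.slice_from _ (by omega), PySem.List.slice_from _ (by omega)]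
  rw [if_neg hne]
  simp only [if_true, List.length_take, List.length_drop]
  have h1 : ((PySem.Chars.find o (lcsB o n)) + ((lcsB o n).length : Int)).toNat
      = (PySem.Chars.find o (lcsB o n)).toNat + (lcsB o n).length := by omega
  have h2 : ((PySem.Chars.find n (lcsB o n)) + ((lcsB o n).length : Int)).toNat
      = (PySem.Chars.find n (lcsB o n)).toNat + (lcsB o n).length := by omega
  rw [h1, h2]
  split_ifs <;> omega

theorem hopperLoop_spec (fuel : Nat) : ∀ (h : List (List Char)) (acc : List Char),
    mu h < fuel → hopperLoop fuel h acc = acc ++ pairsConcat h := by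
  induction fuel with
  | zero => intro h acc hmu; omega
  | succ fuel ih =>
    intro h acc hmu
    match h with
    | [] => simp [hopperLoop, pairsConcat]
    | [x] => simp [hopperLoop, pairsConcat]
    | o :: n :: rest =>
      simp only [hopperLoop]
      by_cases hne : o = n
      · subst hne
        rw [if_pos rfl]
        have hrest : mu rest < fuel := by simp only [mu] at hmu; split_ifs at hmu <;> omega
        rw [ih rest (acc ++ o) hrest]
        simp [pairsConcat, markupB_self]
      · rw [if_neg hne, lcsA_eq_lcsB o n]
        have hrest : mu rest < fuel := by simp only [mu] at hmu; split_ifs at hmu <;> omega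
        by_cases hsp : PySem.Chars.isIn [' '] (lcsB o n) = false
        · rw [if_pos hsp, if_pos rfl]
          rw [ih rest _ hrest]
          simp only [pairsConcat]
          rw [markupB_noSpace (o.length + n.length + 1) o n (by omega) hne hsp]
          by_cases ho : o = [] <;> by_cases hn2 : n = [] <;>
            simp [ho, hn2, List.append_assoc]
        · have hsp2 : PySem.Chars.isIn [' '] (lcsB o n) = true := by
            revert hsp; cases PySem.Chars.isIn [' '] (lcsB o n) <;> simp
          have hne2 : lcsB o n ≠ [] := by
            intro he
            have := (lcs_space_facts o n hsp2).1
            rw [he] at this; simp at this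
          rw [if_neg (show ¬ (PySem.Chars.isIn [' '] (lcsB o n) = false) by simp [hsp2])]
          rw [if_neg hne2]
          have hmu6 := mu_dec o n rest hne hsp2
          rw [ih _ acc (by omega)]
          simp only [pairsConcat]
          rw [markupB_self _ _ (by omega), markupB_space o n hne hsp2]
          simp [List.append_assoc]

-- ===== VERDICT (by name: the statement is the Claim_ definition above) =====
theorem many_pass_markup_spec : Claim_equal_many_pass_markup := by
  intro o n _
  unfold Spec_many_pass_markup many_pass_markup many_pass_markup_alt
  rw [hopperLoop_spec]
  · simp [pairsConcat]
  · simp only [mu]; split <;> omega
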